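-- pv_equiv track=rewrite | github.com/rickscole/MathSundries | Mancala/Object-Oriented 4D Example with Iterative Folding and Cycle Control.py | reset_relative_indices
-- ===== SOURCE A (Python) =====
-- def reset_relative_indices(activeSpot, boardLength, relativeBoardIndices):
--     '''
--     Reset relative indices
--     Which is to say, return a list of where each spot is going to be in the next pecking order
--     '''
--     index_reset = 0
--     leftovers = activeSpot % boardLength
--     for i in range(leftovers, boardLength):
--         relativeBoardIndices[i] = index_reset
--         index_reset+=1
--     for i in range(0, leftovers):
--         relativeBoardIndices[i] = index_reset
--         index_reset+=1
--     return relativeBoardIndices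
-- ===== SOURCE B (Python) =====
-- def reset_relative_indices(activeSpot, boardLength, relativeBoardIndices):
--     '''
--     Reset relative indices: one pass, each rotated index computed directly
--     by modular arithmetic instead of two range loops with a running counter.
--     '''
--     leftovers = activeSpot % boardLength
--     for i in range(boardLength):
--         relativeBoardIndices[i] = (i - leftovers) % boardLength
--     return relativeBoardIndices
-- ===== Notes on version B (the rewrite author's own statement) =====
-- stated objective: simpler
-- what changed: Replaces the two disjoint-range loops with a running index_reset counter by a single loop over range(boardLength) that computes each rotated index directly as (i - leftovers) % boardLength.
import Mathlib
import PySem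

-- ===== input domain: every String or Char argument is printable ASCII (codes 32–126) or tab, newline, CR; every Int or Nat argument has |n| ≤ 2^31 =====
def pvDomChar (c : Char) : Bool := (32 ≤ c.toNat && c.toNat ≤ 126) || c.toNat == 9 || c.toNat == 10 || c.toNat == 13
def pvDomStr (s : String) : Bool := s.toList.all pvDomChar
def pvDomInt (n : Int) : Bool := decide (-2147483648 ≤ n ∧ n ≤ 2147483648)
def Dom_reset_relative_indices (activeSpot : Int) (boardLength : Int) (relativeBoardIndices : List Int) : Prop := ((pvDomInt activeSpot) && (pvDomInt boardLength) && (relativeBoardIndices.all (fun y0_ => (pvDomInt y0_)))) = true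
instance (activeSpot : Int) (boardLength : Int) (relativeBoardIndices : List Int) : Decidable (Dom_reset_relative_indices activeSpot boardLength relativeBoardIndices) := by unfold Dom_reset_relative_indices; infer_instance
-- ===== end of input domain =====

-- B replaces A's two range loops with a running index_reset counter by one loop that
-- assigns each rotated index directly via modular arithmetic (objective: simpler).
-- Both Pythons mutate relativeBoardIndices in place and return the same list object;
-- the equivalence proved here is about the returned value.


-- ===== PORT A =====
-- 'relativeBoardIndices[i] = v' is List.set i.toNat v; under Pre_ every index written
-- satisfies 0 ≤ i < boardLength ≤ length, where List.set is exact Python semantics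
-- (out-of-range writes, Python's IndexError, and boardLength = 0, Python's
-- ZeroDivisionError, are outside Pre_).
def reset_relative_indices (activeSpot : Int) (boardLength : Int) (relativeBoardIndices : List Int) : List Int :=
  let leftovers := PySem.Int.mod activeSpot boardLength
  let s1 := (PySem.List.pyRange leftovers boardLength 1).foldl
      (fun (st : List Int × Int) i => (st.1.set i.toNat st.2, st.2 + 1)) (relativeBoardIndices, 0)
  let s2 := (PySem.List.pyRange 0 leftovers 1).foldl
      (fun (st : List Int × Int) i => (st.1.set i.toNat st.2, st.2 + 1)) s1
  s2.1

-- ===== PORT B =====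
def reset_relative_indices_alt (activeSpot : Int) (boardLength : Int) (relativeBoardIndices : List Int) : List Int :=
  let leftovers := PySem.Int.mod activeSpot boardLength
  (PySem.List.pyRange 0 boardLength 1).foldl
      (fun acc i => acc.set i.toNat (PySem.Int.mod (i - leftovers) boardLength)) relativeBoardIndices

-- ===== PRECONDITION & SPEC =====
-- Pre_ excludes exactly the inputs on which the Python A raises: boardLength = 0
-- (ZeroDivisionError) and 0 < boardLength with boardLength > len(relativeBoardIndices)
-- (IndexError); A returns normally on every other input.
def Pre_reset_relative_indices (activeSpot : Int) (boardLength : Int) (relativeBoardIndices : List Int) : Prop :=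
  boardLength ≠ 0 ∧ boardLength ≤ (relativeBoardIndices.length : Int)
instance (activeSpot : Int) (boardLength : Int) (relativeBoardIndices : List Int) : Decidable (Pre_reset_relative_indices activeSpot boardLength relativeBoardIndices) := by unfold Pre_reset_relative_indices; infer_instance

def pvWitness_reset_relative_indices : Int × Int × List Int := (3, 4, [0, 0, 0, 0])

def Spec_reset_relative_indices (activeSpot : Int) (boardLength : Int) (relativeBoardIndices : List Int) (out : List Int) : Prop := out = reset_relative_indices_alt activeSpot boardLength relativeBoardIndices
instance (activeSpot : Int) (boardLength : Int) (relativeBoardIndices : List Int) (out : List Int) : Decidable (Spec_reset_relative_indices activeSpot boardLength relativeBoardIndices out) := by unfold Spec_reset_relative_indices; infer_instance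

-- ===== CLAIM (what is proved, stated in full; the proofs are below) =====
def Claim_equal_reset_relative_indices : Prop := ∀ (activeSpot : Int) (boardLength : Int) (relativeBoardIndices : List Int), Dom_reset_relative_indices activeSpot boardLength relativeBoardIndices → Pre_reset_relative_indices activeSpot boardLength relativeBoardIndices → Spec_reset_relative_indices activeSpot boardLength relativeBoardIndices (reset_relative_indices activeSpot boardLength relativeBoardIndices)

-- ===== LEMMAS AND PROOFS =====

-- A's loop with its running counter equals a pure fold writing c + i - a at index i
-- (and the counter ends at c + the length of the range).
lemma counter_fold_aux (b : Int) : ∀ (n : Nat) (a c : Int) (xs : List Int), (b - a).toNat = n →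
    (PySem.List.pyRange a b 1).foldl
      (fun (st : List Int × Int) i => (st.1.set i.toNat st.2, st.2 + 1)) (xs, c)
    = ((PySem.List.pyRange a b 1).foldl (fun acc i => acc.set i.toNat (c + i - a)) xs,
       c + ((b - a).toNat : Int)) := by
  intro n
  induction n with
  | zero =>
    intro a c xs h
    rw [PySem.List.pyRange_one_eq_nil (by omega)]
    simp [h]
  | succ n ih =>
    intro a c xs h
    have hab : a < b := by omega
    rw [PySem.List.pyRange_one_cons hab]
    simp only [List.foldl_cons]
    rw [ih (a + 1) (c + 1) (xs.set a.toNat c) (by omega)]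
    rw [show (fun (acc : List Int) (i : Int) => acc.set i.toNat (c + 1 + i - (a + 1)))
        = fun (acc : List Int) (i : Int) => acc.set i.toNat (c + i - a) from
      funext fun acc => funext fun i => by rw [show c + 1 + i - (a + 1) = c + i - a by ring]]
    rw [show c + a - a = c by ring]
    have : c + 1 + ((b - (a + 1)).toNat : Int) = c + ((b - a).toNat : Int) := by omega
    rw [this]

lemma counter_fold (b a c : Int) (xs : List Int) :
    (PySem.List.pyRange a b 1).foldl
      (fun (st : List Int × Int) i => (st.1.set i.toNat st.2, st.2 + 1)) (xs, c)
    = ((PySem.List.pyRange a b 1).foldl (fun acc i => acc.set i.toNat (c + i - a)) xs,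
       c + ((b - a).toNat : Int)) :=
  counter_fold_aux b (b - a).toNat a c xs rfl

-- Folding writes f i at each index of [a, b): the length is preserved …
lemma fold_set_length (f : Int → Int) : ∀ (l : List Int) (xs : List Int),
    (l.foldl (fun acc i => acc.set i.toNat (f i)) xs).length = xs.length := by
  intro l
  induction l with
  | nil => intro xs; rfl
  | cons x t ih => intro xs; simp [List.foldl, ih]

-- … and element j becomes f j exactly when a ≤ j < b and j is in range.
lemma fold_set_get_aux (f : Int → Int) (b : Int) : ∀ (n : Nat) (a : Int), 0 ≤ a →
    (b - a).toNat = n → ∀ (xs : List Int) (j : Nat),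
    ((PySem.List.pyRange a b 1).foldl (fun acc i => acc.set i.toNat (f i)) xs)[j]?
    = if a ≤ (j : Int) ∧ (j : Int) < b ∧ j < xs.length then some (f j) else xs[j]? := by
  intro n
  induction n with
  | zero =>
    intro a ha h xs j
    rw [PySem.List.pyRange_one_eq_nil (by omega)]
    simp only [List.foldl_nil]
    split_ifs with hc
    · omega
    · rfl
  | succ n ih =>
    intro a ha h xs j
    have hab : a < b := by omega
    rw [PySem.List.pyRange_one_cons hab]
    simp only [List.foldl_cons]
    rw [ih (a + 1) (by omega) (by omega) (xs.set a.toNat (f a)) j]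
    rw [List.getElem?_set]
    simp only [List.length_set]
    have hta : (a.toNat : Int) = a := Int.toNat_of_nonneg ha
    split_ifs
    all_goals (try (exfalso; omega))
    all_goals (try rfl)
    all_goals simp_all

lemma fold_set_get (f : Int → Int) (b a : Int) (ha : 0 ≤ a) (xs : List Int) (j : Nat) :
    ((PySem.List.pyRange a b 1).foldl (fun acc i => acc.set i.toNat (f i)) xs)[j]?
    = if a ≤ (j : Int) ∧ (j : Int) < b ∧ j < xs.length then some (f j) else xs[j]? :=
  fold_set_get_aux f b (b - a).toNat a ha rfl xs j

lemma main_eq (a L : Int) (xs : List Int) (hL0 : L ≠ 0) :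
    reset_relative_indices a L xs = reset_relative_indices_alt a L xs := by
  unfold reset_relative_indices reset_relative_indices_alt
  set lef := PySem.Int.mod a L with hlef
  by_cases hL : 0 < L
  · have h1 : 0 ≤ lef := PySem.Int.mod_nonneg a hL
    have h2 : lef < L := PySem.Int.mod_lt a hL
    simp only [counter_fold]
    apply List.ext_getElem?
    intro j
    rw [fold_set_get _ lef 0 le_rfl, fold_set_get _ L lef h1, fold_set_get _ L 0 le_rfl,
        fold_set_length]
    split_ifs <;>
      first
        | rfl
        | (exfalso; omega)
        | (simp only [Option.some.injEq]
           rw [PySem.Int.mod_eq_emod_of_pos hL]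
           try rw [Int.toNat_of_nonneg (show (0:Int) ≤ L - lef by omega)]
           have e1 : ((j:Int) - lef + L) % L = ((j:Int) - lef) % L := by
             have h := Int.add_mul_emod_self_left (a := (j:Int) - lef) (b := L) (c := 1)
             simp only [mul_one] at h
             exact h
           by_cases hcase : lef ≤ (j:Int)
           · rw [Int.emod_eq_of_lt (by omega) (by omega)]
             omega
           · rw [← e1, Int.emod_eq_of_lt (by omega) (by omega)]
             omega)
  · have hLneg : L < 0 := by omega
    have hb := PySem.Int.mod_neg_bounds a hLneg
    simp only [PySem.List.pyRange_one_eq_nil (show L ≤ lef by omega),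
        PySem.List.pyRange_one_eq_nil (show lef ≤ 0 by omega),
        PySem.List.pyRange_one_eq_nil (show L ≤ 0 by omega), List.foldl_nil]

-- ===== VERDICT (by name: the statement is the Claim_ definition above) =====
theorem reset_relative_indices_spec : Claim_equal_reset_relative_indices := by
  intro activeSpot boardLength relativeBoardIndices _ hpre
  exact main_eq activeSpot boardLength relativeBoardIndices hpre.1
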